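-- pv_equiv track=rewrite | github.com/nameearly/Miya | core/pattern_learner.py | _classify_fix_action
-- ===== SOURCE A (Python) =====
-- def _classify_fix_action(action: str) -> str:
--     """分类修复动作"""
--     action_lower = action.lower()
--
--     if any(word in action_lower for word in ['delete', 'remove', 'rm']):
--         return 'delete'
--     elif any(word in action_lower for word in ['add', 'create', 'insert', 'new']):
--         return 'add'
--     elif any(word in action_lower for word in ['modify', 'change', 'update', 'edit']):
--         return 'modify'
--     elif any(word in action_lower for word in ['replace', 'substitute']):
--         return 'replace'
--     elif any(word in action_lower for word in ['move', 'rename', 'copy']):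
--         return 'move'
--     else:
--         return 'unknown'
-- ===== SOURCE B (Python) =====
-- # Single left-to-right scan: at each position, check which keyword starts there
-- # and keep the minimum category priority seen; index a label table at the end.
-- _LABELS = ['delete', 'add', 'modify', 'replace', 'move', 'unknown']
-- _KEYWORDS = {
--     'delete': 0, 'remove': 0, 'rm': 0,
--     'add': 1, 'create': 1, 'insert': 1, 'new': 1,
--     'modify': 2, 'change': 2, 'update': 2, 'edit': 2,
--     'replace': 3, 'substitute': 3,
--     'move': 4, 'rename': 4, 'copy': 4,
-- }
--
--
-- def _classify_fix_action(action: str) -> str: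
--     s = action.lower()
--     best = 5
--     for i in range(len(s)):
--         for kw, pri in _KEYWORDS.items():
--             if pri < best and s.startswith(kw, i):
--                 best = pri
--     return _LABELS[best]
-- ===== Notes on version B (the rewrite author's own statement) =====
-- stated objective: alternative
-- what changed: Replaces the if/elif chain of any-substring tests by a single left-to-right scan over string positions that checks which keyword starts at each position and keeps the minimum category priority, then indexes a label table.
import Mathlib
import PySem

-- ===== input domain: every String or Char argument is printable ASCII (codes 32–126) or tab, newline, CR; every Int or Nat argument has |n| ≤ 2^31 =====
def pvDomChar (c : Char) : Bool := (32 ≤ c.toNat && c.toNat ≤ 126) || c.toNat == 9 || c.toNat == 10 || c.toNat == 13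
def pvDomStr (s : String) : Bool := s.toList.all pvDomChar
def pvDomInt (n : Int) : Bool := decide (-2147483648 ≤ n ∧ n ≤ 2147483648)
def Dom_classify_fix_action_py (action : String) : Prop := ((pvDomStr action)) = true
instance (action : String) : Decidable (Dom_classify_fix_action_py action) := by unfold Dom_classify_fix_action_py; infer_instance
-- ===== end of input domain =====

-- B replaces the if/elif chain of substring tests by one left-to-right positional scan with a minimum-priority accumulator: a different algorithm, same cost class.

-- ===== PORT A =====
def classify_fix_action_py (action : String) : String :=
  let action_lower := PySem.Str.lower action
  if ["delete", "remove", "rm"].any (fun word => PySem.Str.isIn word action_lower) then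
    "delete"
  else if ["add", "create", "insert", "new"].any (fun word => PySem.Str.isIn word action_lower) then
    "add"
  else if ["modify", "change", "update", "edit"].any (fun word => PySem.Str.isIn word action_lower) then
    "modify"
  else if ["replace", "substitute"].any (fun word => PySem.Str.isIn word action_lower) then
    "replace"
  else if ["move", "rename", "copy"].any (fun word => PySem.Str.isIn word action_lower) then
    "move"
  else
    "unknown"

-- ===== PORT B =====
def pvLabels : List String := ["delete", "add", "modify", "replace", "move", "unknown"]

-- the _KEYWORDS dict of Source B, in insertion order, keywords as char lists
def pvKW : List (List Char × Nat) :=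
  [("delete".toList, 0), ("remove".toList, 0), ("rm".toList, 0),
   ("add".toList, 1), ("create".toList, 1), ("insert".toList, 1), ("new".toList, 1),
   ("modify".toList, 2), ("change".toList, 2), ("update".toList, 2), ("edit".toList, 2),
   ("replace".toList, 3), ("substitute".toList, 3),
   ("move".toList, 4), ("rename".toList, 4), ("copy".toList, 4)]

-- Python's s.startswith(kw, i) is exactly: kw is a prefix of s[i:]; ported as Chars.startswith on (chars.drop i) (exact on all inputs)
def classify_fix_action_py_alt (action : String) : String :=
  let chars := (PySem.Str.lower action).toList
  let best :=
    (List.range chars.length).foldl (fun best i =>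
      pvKW.foldl (fun b p =>
        if p.2 < b ∧ PySem.Chars.startswith (chars.drop i) p.1 then p.2 else b) best) 5
  pvLabels.getD best "unknown"

-- ===== PRECONDITION & SPEC =====
def Spec_classify_fix_action_py (action : String) (out : String) : Prop := out = classify_fix_action_py_alt action
instance (action : String) (out : String) : Decidable (Spec_classify_fix_action_py action out) := by unfold Spec_classify_fix_action_py; infer_instance

-- ===== CLAIM (what is proved, stated in full; the proofs are below) =====
def Claim_equal_classify_fix_action_py : Prop := ∀ (action : String), Dom_classify_fix_action_py action → Spec_classify_fix_action_py action (classify_fix_action_py action)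

-- ===== LEMMAS AND PROOFS =====

def pvStep (b : Nat) (p : Nat × Bool) : Nat := if p.1 < b ∧ p.2 then p.1 else b
def pvFlat (chars : List Char) : List (Nat × Bool) :=
  (List.range chars.length).flatMap (fun i =>
    pvKW.map (fun p => (p.2, PySem.Chars.startswith (chars.drop i) p.1)))

lemma pvScan_eq_flat (chars : List Char) :
    (List.range chars.length).foldl (fun best i =>
      pvKW.foldl (fun b p =>
        if p.2 < b ∧ PySem.Chars.startswith (chars.drop i) p.1 then p.2 else b) best) 5
    = (pvFlat chars).foldl pvStep 5 := by
  unfold pvFlat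
  rw [List.foldl_flatMap]
  simp [List.foldl_map, pvStep]

lemma pvFold_le (L : List (Nat × Bool)) (b : Nat) : L.foldl pvStep b ≤ b := by
  induction L generalizing b with
  | nil => simp
  | cons p L ih =>
    simp only [List.foldl_cons, pvStep]
    split_ifs with h
    · exact le_trans (ih _) (le_of_lt h.1)
    · exact ih _

lemma pvFold_le_of_mem (L : List (Nat × Bool)) (b : Nat) {k : Nat} (h : (k, true) ∈ L) :
    L.foldl pvStep b ≤ k := by
  induction L generalizing b with
  | nil => simp at h
  | cons p L ih =>
    rcases List.mem_cons.1 h with h | h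
    · subst h
      simp only [List.foldl_cons, pvStep]
      split_ifs with hc
    -- goals: if-true: foldl ≤ k with init k; if-false: init b with ¬(k<b ∧ true) ⇒ b ≤ k
      · exact pvFold_le _ _
      · exact le_trans (pvFold_le _ _) (by simp at hc; omega)
    · exact ih _ h

lemma pvFold_mem_or_init (L : List (Nat × Bool)) (b : Nat) :
    L.foldl pvStep b = b ∨ (L.foldl pvStep b, true) ∈ L := by
  induction L generalizing b with
  | nil => simp
  | cons p L ih =>
    simp only [List.foldl_cons, pvStep]
    split_ifs with h
    · rcases ih p.1 with h1 | h1
      · right; rw [h1]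
        have : p = (p.1, true) := by
          obtain ⟨a, c⟩ := p; simp at h ⊢; exact h.2
        rw [← this]; exact List.mem_cons_self
      · right; right; exact h1
    · rcases ih b with h1 | h1
      · left; exact h1
      · right; right; exact h1

lemma pvKW_ne_nil : ∀ p ∈ pvKW, p.1 ≠ [] := by decide

lemma pvMem_flat_iff (chars : List Char) (k : Nat) :
    (k, true) ∈ pvFlat chars ↔ ∃ p ∈ pvKW, p.2 = k ∧ PySem.Chars.isIn p.1 chars = true := by
  unfold pvFlat
  simp only [List.mem_flatMap, List.mem_map, List.mem_range, Prod.mk.injEq]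
  constructor
  · rintro ⟨i, hi, p, hp, hk, hs⟩
    refine ⟨p, hp, hk, ?_⟩
    rw [← PySem.Chars.exists_prefix_drop_iff_isIn]
    exact ⟨i, (PySem.Chars.startswith_iff _ _).1 hs⟩
  · rintro ⟨p, hp, hk, hin⟩
    obtain ⟨j, hj⟩ := (PySem.Chars.exists_prefix_drop_iff_isIn _ _).2 hin
    have hjlt : j < chars.length := by
      by_contra hge
      have : chars.drop j = [] := List.drop_eq_nil_of_le (by omega)
      rw [this] at hj
      exact pvKW_ne_nil p hp (List.prefix_nil.1 hj)
    exact ⟨j, hjlt, p, hp, hk, (PySem.Chars.startswith_iff _ _).2 hj⟩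

def pvCatOf : Nat → List (List Char)
  | 0 => ["delete".toList, "remove".toList, "rm".toList]
  | 1 => ["add".toList, "create".toList, "insert".toList, "new".toList]
  | 2 => ["modify".toList, "change".toList, "update".toList, "edit".toList]
  | 3 => ["replace".toList, "substitute".toList]
  | 4 => ["move".toList, "rename".toList, "copy".toList]
  | _ => []

lemma pvKW_cat : ∀ p ∈ pvKW, p.1 ∈ pvCatOf p.2 := by decide

lemma pvCat_KW (k : Nat) (w : List Char) (hw : w ∈ pvCatOf k) : (w, k) ∈ pvKW := by
  match k with
  | 0 | 1 | 2 | 3 | 4 =>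
    simp only [pvCatOf, List.mem_cons, List.not_mem_nil, or_false] at hw
    rcases hw with rfl | rfl | rfl | rfl <;> simp [pvKW]
  | (n+5) => simp [pvCatOf] at hw

lemma pvFlat_iff_any (chars : List Char) (k : Nat) :
    (k, true) ∈ pvFlat chars ↔ (pvCatOf k).any (fun w => PySem.Chars.isIn w chars) = true := by
  rw [pvMem_flat_iff, List.any_eq_true]
  constructor
  · rintro ⟨p, hp, rfl, hin⟩
    exact ⟨p.1, pvKW_cat p hp, hin⟩
  · rintro ⟨w, hw, hin⟩
    exact ⟨(w, k), pvCat_KW k w hw, rfl, hin⟩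

lemma pvMain (chars : List Char) :
    (if ["delete", "remove", "rm"].any (fun word => PySem.Chars.isIn word.toList chars) then "delete"
     else if ["add", "create", "insert", "new"].any (fun word => PySem.Chars.isIn word.toList chars) then "add"
     else if ["modify", "change", "update", "edit"].any (fun word => PySem.Chars.isIn word.toList chars) then "modify"
     else if ["replace", "substitute"].any (fun word => PySem.Chars.isIn word.toList chars) then "replace"
     else if ["move", "rename", "copy"].any (fun word => PySem.Chars.isIn word.toList chars) then "move"
     else "unknown")
    = pvLabels.getD ((pvFlat chars).foldl pvStep 5) "unknown" := by
  have hiff : ∀ k, ((k, true) ∈ pvFlat chars ↔ (pvCatOf k).any (fun w => PySem.Chars.isIn w chars) = true) :=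
    pvFlat_iff_any chars
  set F := (pvFlat chars).foldl pvStep 5 with hF
  have hle5 : F ≤ 5 := pvFold_le _ _
  have hmem := pvFold_mem_or_init (pvFlat chars) 5
  have hub : ∀ k, (pvCatOf k).any (fun w => PySem.Chars.isIn w chars) = true → F ≤ k :=
    fun k h => pvFold_le_of_mem _ _ ((hiff k).2 h)
  have hval : ∀ k, F = k → k ≠ 5 → (pvCatOf k).any (fun w => PySem.Chars.isIn w chars) = true := by
    intro k hk h5
    rcases hmem with h | h
    · omega
    · exact (hiff k).1 (hk ▸ h)
  split_ifs with h0 h1 h2 h3 h4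
  · have : F = 0 := Nat.le_zero.1 (hub 0 (by simpa [pvCatOf] using h0))
    simp [this, pvLabels]
  · have hle : F ≤ 1 := hub 1 (by simpa [pvCatOf] using h1)
    have : F ≠ 0 := by
      intro h
      exact h0 (by simpa [pvCatOf] using hval 0 h (by omega))
    have : F = 1 := by omega
    simp [this, pvLabels]
  · have hle : F ≤ 2 := hub 2 (by simpa [pvCatOf] using h2)
    have e0 : F ≠ 0 := fun h => h0 (by simpa [pvCatOf] using hval 0 h (by omega))
    have e1 : F ≠ 1 := fun h => h1 (by simpa [pvCatOf] using hval 1 h (by omega))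
    have : F = 2 := by omega
    simp [this, pvLabels]
  · have hle : F ≤ 3 := hub 3 (by simpa [pvCatOf] using h3)
    have e0 : F ≠ 0 := fun h => h0 (by simpa [pvCatOf] using hval 0 h (by omega))
    have e1 : F ≠ 1 := fun h => h1 (by simpa [pvCatOf] using hval 1 h (by omega))
    have e2 : F ≠ 2 := fun h => h2 (by simpa [pvCatOf] using hval 2 h (by omega))
    have : F = 3 := by omega
    simp [this, pvLabels]
  · have hle : F ≤ 4 := hub 4 (by simpa [pvCatOf] using h4)
    have e0 : F ≠ 0 := fun h => h0 (by simpa [pvCatOf] using hval 0 h (by omega))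
    have e1 : F ≠ 1 := fun h => h1 (by simpa [pvCatOf] using hval 1 h (by omega))
    have e2 : F ≠ 2 := fun h => h2 (by simpa [pvCatOf] using hval 2 h (by omega))
    have e3 : F ≠ 3 := fun h => h3 (by simpa [pvCatOf] using hval 3 h (by omega))
    have : F = 4 := by omega
    simp [this, pvLabels]
  · have e0 : F ≠ 0 := fun h => h0 (by simpa [pvCatOf] using hval 0 h (by omega))
    have e1 : F ≠ 1 := fun h => h1 (by simpa [pvCatOf] using hval 1 h (by omega))
    have e2 : F ≠ 2 := fun h => h2 (by simpa [pvCatOf] using hval 2 h (by omega))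
    have e3 : F ≠ 3 := fun h => h3 (by simpa [pvCatOf] using hval 3 h (by omega))
    have e4 : F ≠ 4 := fun h => h4 (by simpa [pvCatOf] using hval 4 h (by omega))
    have : F = 5 := by omega
    simp [this, pvLabels]

-- ===== VERDICT (by name: the statement is the Claim_ definition above) =====
theorem classify_fix_action_py_spec : Claim_equal_classify_fix_action_py := by
  intro action _
  unfold Spec_classify_fix_action_py classify_fix_action_py classify_fix_action_py_alt
  simp only [PySem.Str.isIn_eq, pvScan_eq_flat]
  exact pvMain _
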